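-- pv_equiv track=rewrite | github.com/goldenkiwi-hyeuk/coding_test | LEVEL1/과일장수.py | solution
-- ===== SOURCE A (Python) =====
-- def solution(k, m, score):
--   score = sorted(score, reverse = True)
--   box = []
--   answer = 0
--   for i in score:
--       box.append(i)
--       if len(box) == m:
--         answer = answer + min(box)*m
--         box = []
--   return answer
-- ===== SOURCE B (Python) =====
-- def solution(k, m, score):
--     if m <= 0:
--         return 0
--     s = sorted(score, reverse=True)
--     return m * sum(s[i] for i in range(m - 1, len(s), m))
-- ===== Notes on version B (the rewrite author's own statement) =====
-- stated objective: simpler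
-- what changed: Instead of accumulating a box list and taking min() per full box, B sorts descending once and directly sums every m-th element (indices m-1, 2m-1, ...), which are exactly the group minima.
import Mathlib
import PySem

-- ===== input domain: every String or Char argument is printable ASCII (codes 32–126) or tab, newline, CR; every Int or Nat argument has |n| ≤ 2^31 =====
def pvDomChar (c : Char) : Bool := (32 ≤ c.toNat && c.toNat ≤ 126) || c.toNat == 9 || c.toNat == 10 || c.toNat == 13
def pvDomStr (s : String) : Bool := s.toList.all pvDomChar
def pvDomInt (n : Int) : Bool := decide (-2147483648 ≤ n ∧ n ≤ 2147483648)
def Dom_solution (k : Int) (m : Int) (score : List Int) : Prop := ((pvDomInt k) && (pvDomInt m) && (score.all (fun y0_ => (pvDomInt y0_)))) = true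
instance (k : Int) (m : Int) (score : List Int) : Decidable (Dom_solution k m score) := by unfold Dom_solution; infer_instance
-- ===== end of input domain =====

-- B replaces A's box accumulator and per-box min() by summing every m-th element of the
-- descending sort directly (same return value; A does not mutate its arguments).

-- ===== PORT A =====
-- the body of A's for-loop: state = (box, answer)
def solStep (m : Int) (st : List Int × Int) (i : Int) : List Int × Int :=
  let box := st.1 ++ [i]
  if (box.length : Int) = m then
    ([], st.2 + ((PySem.List.min? box (fun x => x)).getD 0) * m)
  else
    (box, st.2)

def solution (k : Int) (m : Int) (score : List Int) : Int :=
  let score' := PySem.List.sorted score (fun x => x) true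
  (score'.foldl (solStep m) ([], 0)).2

-- ===== PORT B =====
def solution_alt (k : Int) (m : Int) (score : List Int) : Int :=
  if m ≤ 0 then 0
  else
    let s := PySem.List.sorted score (fun x => x) true
    m * ((PySem.List.pyRange (m - 1) (s.length : Int) m).map
          (fun i => PySem.List.pyGetD s i 0)).sum

-- ===== PRECONDITION & SPEC =====
def Spec_solution (k : Int) (m : Int) (score : List Int) (out : Int) : Prop := out = solution_alt k m score
instance (k : Int) (m : Int) (score : List Int) (out : Int) : Decidable (Spec_solution k m score out) := by unfold Spec_solution; infer_instance

-- ===== CLAIM (what is proved, stated in full; the proofs are below) =====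
def Claim_equal_solution : Prop := ∀ (k : Int) (m : Int) (score : List Int), Dom_solution k m score → Spec_solution k m score (solution k m score)

-- ===== LEMMAS AND PROOFS =====

-- sum of d[m-1], d[2m-1], … in Nat-indexed form
def sumStride (d : List Int) (mn : Nat) : Int :=
  ((List.range (d.length / mn)).map (fun j => d.getD (mn - 1 + mn * j) 0)).sum

-- m ≤ 0: the box never has length m, the answer stays 0
lemma foldl_nonpos (m : Int) (hm : m ≤ 0) :
    ∀ (l : List Int) (b : List Int) (a : Int), (l.foldl (solStep m) (b, a)).2 = a := by
  intro l
  induction l with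
  | nil => intro b a; rfl
  | cons x t ih =>
    intro b a
    have hcond : ¬ (((b ++ [x]).length : Int) = m) := by
      simp only [List.length_append, List.length_cons, List.length_nil]
      omega
    simp only [List.foldl_cons, solStep, if_neg hcond]
    exact ih _ _

-- answer accumulator shifts out of the fold
lemma foldl_shift (m : Int) :
    ∀ (l : List Int) (b : List Int) (a : Int),
      (l.foldl (solStep m) (b, a)).2 = a + (l.foldl (solStep m) (b, 0)).2 := by
  intro l
  induction l with
  | nil => intro b a; simp
  | cons x t ih =>
    intro b a
    by_cases hcond : (((b ++ [x]).length : Int) = m)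
    · simp only [List.foldl_cons, solStep, if_pos hcond]
      rw [ih, ih ([]) (0 + _)]
      ring
    · simp only [List.foldl_cons, solStep, if_neg hcond]
      rw [ih, ih (b ++ [x]) 0]

-- a run shorter than m never fires the condition
lemma foldl_underfill (m : Int) :
    ∀ (l : List Int) (b : List Int) (a : Int), ((b.length + l.length : Nat) : Int) < m →
      l.foldl (solStep m) (b, a) = (b ++ l, a) := by
  intro l
  induction l with
  | nil => intro b a _; simp
  | cons x t ih =>
    intro b a h
    have hcond : ¬ (((b ++ [x]).length : Int) = m) := by
      simp only [List.length_append, List.length_cons, List.length_nil]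
      simp only [List.length_cons] at h
      push_cast at h ⊢
      omega
    simp only [List.foldl_cons, solStep, if_neg hcond]
    rw [ih (b ++ [x]) a (by simp only [List.length_append, List.length_cons, List.length_nil] at *; push_cast at h ⊢; omega)]
    simp

-- the last element of a descending list is its minimum
lemma getLast_le_of_desc :
    ∀ (c : List Int) (hne : c ≠ []), c.Pairwise (fun a b => b ≤ a) →
      ∀ y ∈ c, c.getLast hne ≤ y := by
  intro c
  induction c with
  | nil => intro hne; exact absurd rfl hne
  | cons x t ih =>
    intro _ hp y hy
    rcases List.pairwise_cons.mp hp with ⟨hx, ht⟩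
    cases t with
    | nil =>
      simp at hy; simp [hy, List.getLast]
    | cons z s =>
      have hne2 : z :: s ≠ [] := by simp
      rw [List.getLast_cons hne2]
      rcases List.mem_cons.mp hy with rfl | hy'
      · exact hx _ (List.getLast_mem hne2)
      · exact ih hne2 ht y hy'

lemma min_desc (c : List Int) (hne : c ≠ []) (hp : c.Pairwise (fun a b => b ≤ a)) :
    (PySem.List.min? c (fun x => x)).getD 0 = c.getLast hne := by
  rcases hmn : PySem.List.min? c (fun x => x) with _ | mn
  · exact absurd ((PySem.List.min?_eq_none_iff c (fun x => x)).mp hmn) hne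
  · have hmem := PySem.List.min?_mem hmn
    have hmin := PySem.List.min?_isMin hmn
    have h1 : mn ≤ c.getLast hne := hmin _ (List.getLast_mem _)
    have h2 : c.getLast hne ≤ mn := getLast_le_of_desc c hne hp mn hmem
    simp [le_antisymm h1 h2]

-- a full box of length m empties and adds min * m
lemma foldl_fill (m : Int) (c : List Int) (hne : c ≠ []) (hlen : (c.length : Int) = m) (a : Int) :
    c.foldl (solStep m) ([], a) = ([], a + ((PySem.List.min? c (fun x => x)).getD 0) * m) := by
  have hsplit : c = c.dropLast ++ [c.getLast hne] := (List.dropLast_append_getLast hne).symm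
  conv_lhs => rw [hsplit]
  rw [List.foldl_append]
  rw [foldl_underfill m c.dropLast [] a (by
    simp only [List.length_nil, List.length_dropLast]
    have : 1 ≤ c.length := List.length_pos_iff.mpr hne
    omega)]
  simp only [List.foldl_cons, List.foldl_nil, List.nil_append, solStep]
  rw [if_pos (by rw [← hsplit]; exact hlen)]
  rw [← hsplit]

-- stride-sum recursion: peel the first chunk of size mn
lemma sumStride_rec (d : List Int) (mn : Nat) (h1 : 1 ≤ mn) (h2 : mn ≤ d.length) :
    sumStride d mn = d.getD (mn - 1) 0 + sumStride (d.drop mn) mn := by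
  unfold sumStride
  have hdiv : d.length / mn = (d.length - mn) / mn + 1 := by
    rw [Nat.div_eq_sub_div (by omega) h2]
  rw [hdiv, List.range_succ_eq_map]
  simp only [List.map_cons, List.map_map, List.sum_cons, List.length_drop]
  have hh : mn - 1 + mn * 0 = mn - 1 := by omega
  rw [hh]
  congr 1
  apply congrArg
  apply List.map_congr_left
  intro j _
  simp only [Function.comp_apply, Nat.succ_eq_add_one]
  have hidx : mn - 1 + mn * (j + 1) = mn + (mn - 1 + mn * j) := by
    rw [Nat.mul_add]
    omega
  rw [hidx, List.getD_eq_getElem?_getD, List.getD_eq_getElem?_getD, List.getElem?_drop]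

-- bridge: B's pyRange/pyGetD sum IS sumStride
lemma stride_eq (m : Int) (hm : 0 < m) (d : List Int) :
    ((PySem.List.pyRange (m - 1) (d.length : Int) m).map
        (fun i => PySem.List.pyGetD d i 0)).sum = sumStride d m.toNat := by
  obtain ⟨mn, rfl⟩ : ∃ mn : Nat, m = (mn : Int) := ⟨m.toNat, (Int.toNat_of_nonneg hm.le).symm⟩
  have hmn1 : 1 ≤ mn := by exact_mod_cast hm
  rw [PySem.List.pyRange_of_pos _ _ hm, Int.toNat_natCast]
  have hcount : (if (mn : Int) - 1 < (d.length : Int)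
        then (((d.length : Int) - ((mn : Int) - 1) + (mn : Int) - 1) / (mn : Int)).toNat else 0)
      = d.length / mn := by
    by_cases hlt : (mn : Int) - 1 < (d.length : Int)
    · rw [if_pos hlt]
      have h1 : ((d.length : Int) - ((mn : Int) - 1) + (mn : Int) - 1) = (d.length : Int) := by ring
      rw [h1, ← Int.natCast_div, Int.toNat_natCast]
    · rw [if_neg hlt]
      symm
      rw [Nat.div_eq_zero_iff]
      omega
  rw [hcount]
  unfold sumStride
  rw [List.map_map]
  apply congrArg
  apply List.map_congr_left
  intro j _
  simp only [Function.comp_apply]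
  have hidx : (mn : Int) - 1 + (mn : Int) * (j : Int) = ((mn - 1 + mn * j : Nat) : Int) := by
    push_cast
    omega
  rw [hidx, PySem.List.pyGetD_natCast]

-- main loop lemma: over a descending list the fold computes m * sumStride
lemma foldl_eq_sumStride (m : Int) (hm : 0 < m) :
    ∀ (n : Nat) (d : List Int), d.length = n → d.Pairwise (fun a b => b ≤ a) →
      (d.foldl (solStep m) ([], 0)).2 = m * sumStride d m.toNat := by
  intro n
  induction n using Nat.strong_induction_on with
  | _ n ih =>
    intro d hlen hp
    by_cases hcase : (d.length : Int) < m
    · rw [foldl_underfill m d [] 0 (by simpa using hcase)]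
      have : d.length / m.toNat = 0 := by
        rw [Nat.div_eq_zero_iff]
        omega
      simp [sumStride, this]
    · rw [not_lt] at hcase
      set mn := m.toNat with hmn
      have hm1 : 1 ≤ mn := by omega
      have hmle : mn ≤ d.length := by omega
      set c := d.take mn with hc
      set r := d.drop mn with hr
      have hclen : c.length = mn := by rw [hc, List.length_take]; omega
      have hcne : c ≠ [] := by
        intro h; rw [h] at hclen; simp at hclen; omega
      have hsplit : d = c ++ r := (List.take_append_drop mn d).symm
      conv_lhs => rw [hsplit]
      rw [List.foldl_append]
      rw [foldl_fill m c hcne (by rw [hclen]; omega) 0]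
      rw [foldl_shift]
      have hrlen : r.length = n - mn := by simp [hr, hlen]
      have hrp : r.Pairwise (fun a b => b ≤ a) := hp.sublist (List.drop_sublist mn d)
      rw [ih (n - mn) (by omega) r hrlen hrp]
      rw [sumStride_rec d mn hm1 hmle]
      have hminlast : (PySem.List.min? c (fun x => x)).getD 0 = d.getD (mn - 1) 0 := by
        rw [min_desc c hcne (hp.sublist (List.take_sublist mn d))]
        have h1 : some (c.getLast hcne) = d[mn - 1]? := by
          rw [← List.getLast?_eq_some_getLast, List.getLast?_eq_getElem?, hclen, hc,
            List.getElem?_take, if_pos (by omega)]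
        rw [List.getD_eq_getElem?_getD, ← h1]
        rfl
      rw [hminlast, ← hr]
      ring

-- ===== VERDICT (by name: the statement is the Claim_ definition above) =====
theorem solution_spec : Claim_equal_solution := by
  intro k m score _
  unfold Spec_solution solution solution_alt
  by_cases hm : m ≤ 0
  · rw [if_pos hm]
    exact foldl_nonpos m hm _ [] 0
  · rw [if_neg hm]
    have hm' : 0 < m := by omega
    have hp : (PySem.List.sorted score (fun x => x) true).Pairwise (fun a b => b ≤ a) :=
      PySem.List.sorted_pairwise_rev score (fun x => x)
    show (List.foldl (solStep m) ([], 0) (PySem.List.sorted score (fun x => x) true)).2 =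
      m * ((PySem.List.pyRange (m - 1) ((PySem.List.sorted score (fun x => x) true).length : Int) m).map
            (fun i => PySem.List.pyGetD (PySem.List.sorted score (fun x => x) true) i 0)).sum
    rw [foldl_eq_sumStride m hm' _ _ rfl hp, stride_eq m hm']
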